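-- pv_equiv track=rewrite | github.com/Lakshya-Kejriwal/Lizard-problem | homework.py | checkCostWithTrees
-- ===== SOURCE A (Python) =====
-- def checkCostWithTrees(values, count):
--     index = [index for index, j in enumerate(values) if j==2]
--     if count > len(index)+1:
--         return True
--     index.append(len(values)-1)
--     index.insert(0, 0)
--     cost = 0
--     for idx in range(len(index)-1):
--         if(values[index[idx]:index[idx+1]+1].count(1) == 2):
--             cost = cost + 1
--         elif(values[index[idx]:index[idx+1]+1].count(1) > 2):
--             cost += values[index[idx]:index[idx+1]+1].count(1)
--
--     return cost
-- ===== SOURCE B (Python) =====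
-- def _flush(cost, seg_ones):
--     if seg_ones == 2:
--         return cost + 1
--     elif seg_ones > 2:
--         return cost + seg_ones
--     return cost
--
-- def checkCostWithTrees(values, count):
--     num_trees = values.count(2)
--     if count > num_trees + 1:
--         return True
--     cost = 0
--     seg_ones = 0
--     for v in values:
--         if v == 1:
--             seg_ones += 1
--         elif v == 2:
--             cost = _flush(cost, seg_ones)
--             seg_ones = 0
--     return _flush(cost, seg_ones)
-- ===== Notes on version B (the rewrite author's own statement) =====
-- stated objective: faster
-- what changed: Replaces the tree-index list plus per-segment slicing-and-.count(1) (each segment materialised and counted up to three times) with a single running-counter pass that counts ones and flushes on each 2 and once at the end, using values.count(2) for the early-exit test. Pre_ excludes inputs with count > values.count(2)+1, where A returns the Python boolean True (not an int); B does the same there.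
-- outside the precondition, e.g. on checkCostWithTrees([0, 0], 2): A returns True, B returns True; on checkCostWithTrees([1, 1], 3): A returns True, B returns True
import Mathlib
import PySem

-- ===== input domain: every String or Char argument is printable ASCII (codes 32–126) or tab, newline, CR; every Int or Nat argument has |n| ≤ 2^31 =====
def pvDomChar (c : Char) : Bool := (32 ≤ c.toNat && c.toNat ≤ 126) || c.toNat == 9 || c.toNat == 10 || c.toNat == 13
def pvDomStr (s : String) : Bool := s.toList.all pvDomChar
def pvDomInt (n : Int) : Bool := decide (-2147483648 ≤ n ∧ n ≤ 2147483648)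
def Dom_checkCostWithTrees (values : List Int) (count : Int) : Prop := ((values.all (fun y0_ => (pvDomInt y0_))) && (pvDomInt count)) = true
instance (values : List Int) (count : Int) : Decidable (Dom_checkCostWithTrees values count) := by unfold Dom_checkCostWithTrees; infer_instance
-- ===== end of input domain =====

-- B replaces A's tree-index list plus per-segment slicing/.count(1) with a single running-counter pass (constant-factor faster).

-- ===== PORT A =====
def checkCostWithTrees (values : List Int) (count : Int) : Int :=
  let index := ((PySem.List.enumerate values 0).filter (fun p => p.2 == 2)).map Prod.fst
  if count > (index.length : Int) + 1 then 1   -- Python returns True (== 1)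
  else
    let index2 : List Int := (0 : Int) :: (index ++ [((values.length : Int) - 1)])
    (PySem.List.pyRange 0 ((index2.length : Int) - 1) 1).foldl (fun cost idx =>
      let c : Int := ((PySem.List.slice values (some (PySem.List.pyGetD index2 idx 0))
                        (some (PySem.List.pyGetD index2 (idx + 1) 0 + 1))).count 1 : Int)
      if c == 2 then cost + 1
      else if c > 2 then cost + c
      else cost) 0

-- ===== PORT B =====
-- B-side helper (Source B's _flush)
def flushCost (cost seg : Int) : Int :=
  if seg == 2 then cost + 1 else if seg > 2 then cost + seg else cost

def checkCostWithTrees_alt (values : List Int) (count : Int) : Int :=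
  let numTrees := values.count 2
  if count > (numTrees : Int) + 1 then 1   -- Python returns True (== 1)
  else
    let st := values.foldl (fun (st : Int × Int) v =>
      if v == 1 then (st.1, st.2 + 1)
      else if v == 2 then (flushCost st.1 st.2, 0)
      else st) ((0 : Int), (0 : Int))
    flushCost st.1 st.2

-- ===== PRECONDITION & SPEC =====
-- Pre_ excludes the inputs with count > values.count(2) + 1, on which A (and B) return the
-- Python boolean True, which is not a value of the declared return type int.
def Pre_checkCostWithTrees (values : List Int) (count : Int) : Prop :=
  count ≤ (values.count 2 : Int) + 1
instance (values : List Int) (count : Int) : Decidable (Pre_checkCostWithTrees values count) := by unfold Pre_checkCostWithTrees; infer_instance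
def pvWitness_checkCostWithTrees : List Int × Int := ([1, 2, 1], 1)
def Spec_checkCostWithTrees (values : List Int) (count : Int) (out : Int) : Prop := out = checkCostWithTrees_alt values count
instance (values : List Int) (count : Int) (out : Int) : Decidable (Spec_checkCostWithTrees values count out) := by unfold Spec_checkCostWithTrees; infer_instance

-- ===== CLAIM (what is proved, stated in full; the proofs are below) =====
def Claim_equal_checkCostWithTrees : Prop := ∀ (values : List Int) (count : Int), Dom_checkCostWithTrees values count → Pre_checkCostWithTrees values count → Spec_checkCostWithTrees values count (checkCostWithTrees values count)

-- ===== LEMMAS AND PROOFS =====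

-- positions of 2s with a start offset (A's `index` is posS values 0)
def posS (v : List Int) (s : Int) : List Int :=
  ((PySem.List.enumerate v s).filter (fun p => p.2 == 2)).map Prod.fst

-- the common segment recursion: cost of v given `seg` ones already in the open segment
def G (seg : Int) : List Int → Int
  | [] => flushCost 0 seg
  | v :: xs => if v = 1 then G (seg + 1) xs
      else if v = 2 then flushCost 0 seg + G 0 xs
      else G seg xs

-- A's loop term, Int-indexed then Nat-indexed
def TA (v cut : List Int) (i : Int) : Int :=
  ((PySem.List.slice v (some (PySem.List.pyGetD cut i 0))
     (some (PySem.List.pyGetD cut (i + 1) 0 + 1))).count 1 : Int)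

def TN (v cut : List Int) (k : Nat) : Int :=
  ((PySem.List.slice v (some (cut.getD k 0)) (some (cut.getD (k + 1) 0 + 1))).count 1 : Int)

-- sum of A's loop terms over consecutive pairs of a cut list
def pairSum (v : List Int) : Int → List Int → Int
  | _, [] => 0
  | a, b :: bs =>
      flushCost 0 ((PySem.List.slice v (some a) (some (b + 1))).count 1 : Int) + pairSum v b bs

def pairSumSeg (seg : Int) (v : List Int) : List Int → Int
  | [] => 0
  | b :: bs =>
      flushCost 0 (seg + ((PySem.List.slice v (some 0) (some (b + 1))).count 1 : Int)) + pairSum v b bs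

theorem flushCost_eq (c s : Int) : flushCost c s = c + flushCost 0 s := by
  unfold flushCost; split_ifs <;> ring

theorem posS_cons (x : Int) (xs : List Int) (s : Int) :
    posS (x :: xs) s = if x = 2 then s :: posS xs (s + 1) else posS xs (s + 1) := by
  simp only [posS, PySem.List.enumerate_cons, List.filter_cons]
  by_cases h : x = 2 <;> simp [h]

theorem posS_shift (xs : List Int) : ∀ s : Int, posS xs s = (posS xs 0).map (· + s) := by
  induction xs with
  | nil => intro s; simp [posS]
  | cons x xs ih =>
      intro s
      rw [posS_cons, posS_cons]
      simp only [zero_add]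
      rw [ih (s + 1), ih 1]
      by_cases h : x = 2 <;> simp [h, List.map_map, Function.comp_def] <;>
        · intro a _; ring

theorem posS_length (xs : List Int) : ∀ s : Int, (posS xs s).length = xs.count 2 := by
  induction xs with
  | nil => intro s; simp [posS]
  | cons x xs ih =>
      intro s
      rw [posS_cons, List.count_cons]
      by_cases h : x = 2 <;> simp [h, ih]

theorem posS_nonneg (xs : List Int) : ∀ (s y : Int), y ∈ posS xs s → s ≤ y := by
  induction xs with
  | nil => intro s y h; simp [posS] at h
  | cons x xs ih =>
      intro s y h
      rw [posS_cons] at h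
      by_cases hx : x = 2
      · simp [hx] at h
        rcases h with h | h
        · omega
        · have := ih (s + 1) y h; omega
      · simp [hx] at h
        have := ih (s + 1) y h; omega

-- slice facts
theorem slice_zero_cons (x : Int) (xs : List Int) (b : Int) (hb : -1 ≤ b) :
    PySem.List.slice (x :: xs) (some 0) (some (b + 2)) = x :: PySem.List.slice xs (some 0) (some (b + 1)) := by
  rw [PySem.List.slice_toNat _ (by omega) (by omega), PySem.List.slice_toNat _ (by omega) (by omega)]
  have h2 : (b + 2).toNat = (b + 1).toNat + 1 := by omega
  simp [h2]

theorem slice_succ_cons (x : Int) (xs : List Int) (a b : Int) (ha : 0 ≤ a) (hb : -1 ≤ b) :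
    PySem.List.slice (x :: xs) (some (a + 1)) (some (b + 2)) = PySem.List.slice xs (some a) (some (b + 1)) := by
  rw [PySem.List.slice_toNat _ (by omega) (by omega), PySem.List.slice_toNat _ (by omega) (by omega)]
  have h1 : (a + 1).toNat = a.toNat + 1 := by omega
  simp only [h1, List.drop_succ_cons]
  congr 1
  omega

theorem pairSum_shift (x : Int) (xs : List Int) :
    ∀ (bs : List Int) (a : Int), (bs ≠ [] → 0 ≤ a) → (∀ y ∈ bs, -1 ≤ y) →
      (∀ y ∈ bs.dropLast, 0 ≤ y) →
      pairSum (x :: xs) (a + 1) (bs.map (· + 1)) = pairSum xs a bs := by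
  intro bs
  induction bs with
  | nil => intro a _ _ _; simp [pairSum]
  | cons b bs ih =>
      intro a ha hmem hdrop
      have hb : -1 ≤ b := hmem b (by simp)
      have ha' : 0 ≤ a := ha (by simp)
      simp only [List.map_cons, pairSum]
      have hsl : PySem.List.slice (x :: xs) (some (a + 1)) (some (b + 1 + 1))
          = PySem.List.slice xs (some a) (some (b + 1)) := by
        have := slice_succ_cons x xs a b ha' hb
        simpa [add_assoc] using this
      rw [hsl]
      congr 1
      cases bs with
      | nil => simp [pairSum]
      | cons c cs =>
          have hb0 : 0 ≤ b := hdrop b (by simp [List.dropLast_cons₂])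
          exact ih b (fun _ => hb0) (fun y hy => hmem y (by simp [hy]))
            (fun y hy => hdrop y (by simp [List.dropLast_cons₂]; right; exact hy))

theorem cut_mem_ge (v : List Int) : ∀ y ∈ posS v 0 ++ [((v.length : Int) - 1)], -1 ≤ y := by
  intro y hy
  rcases List.mem_append.mp hy with h | h
  · have := posS_nonneg v 0 y h; omega
  · simp at h; omega

theorem cut_dropLast_ge (v : List Int) : ∀ y ∈ (posS v 0 ++ [((v.length : Int) - 1)]).dropLast, 0 ≤ y := by
  intro y hy
  rw [List.dropLast_concat] at hy
  exact posS_nonneg v 0 y hy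

theorem main_pairSum (v : List Int) :
    ∀ seg : Int, pairSumSeg seg v (posS v 0 ++ [((v.length : Int) - 1)]) = G seg v := by
  induction v with
  | nil =>
      intro seg
      simp [posS, pairSumSeg, pairSum, G]
  | cons x xs ih =>
      intro seg
      have hmem := cut_mem_ge xs
      have hdrop := cut_dropLast_ge xs
      have hcons : posS (x :: xs) 0 = if x = 2 then 0 :: (posS xs 0).map (· + 1) else (posS xs 0).map (· + 1) := by
        rw [posS_cons]
        simp only [zero_add]
        rw [posS_shift xs 1]
      rcases hct : posS xs 0 ++ [((xs.length : Int) - 1)] with _ | ⟨b, bs⟩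
      · exact absurd hct (by simp)
      rw [hct] at hmem hdrop
      have hb : -1 ≤ b := hmem b (by simp)
      have hb0 : bs ≠ [] → 0 ≤ b := by
        intro hne
        apply hdrop
        cases bs with
        | nil => exact absurd rfl hne
        | cons c cs => simp [List.dropLast_cons₂]
      have hmem' : ∀ y ∈ bs, -1 ≤ y := fun y hy => hmem y (by simp [hy])
      have hdrop' : ∀ y ∈ bs.dropLast, 0 ≤ y := by
        intro y hy
        apply hdrop
        cases bs with
        | nil => simp at hy
        | cons c cs => simp [List.dropLast_cons₂] at hy ⊢; right; exact hy
      have hlen2 : (((x :: xs).length : Int) - 1) = (xs.length : Int) := by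
        simp
      have hmap : (posS xs 0).map (· + 1) ++ [(xs.length : Int)]
          = (b :: bs).map (· + 1) := by
        rw [← hct, List.map_append]
        norm_num
      have hslz : ∀ y : Int, -1 ≤ y → PySem.List.slice (x :: xs) (some 0) (some (y + 1 + 1))
          = x :: PySem.List.slice xs (some 0) (some (y + 1)) := by
        intro y hy
        have := slice_zero_cons x xs y hy
        simpa [add_assoc] using this
      have hcnt : ∀ y : Int, -1 ≤ y →
          (((PySem.List.slice (x :: xs) (some 0) (some (y + 1 + 1))).count 1 : Int))
            = (if x = 1 then 1 else 0) + ((PySem.List.slice xs (some 0) (some (y + 1))).count 1 : Int) := by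
        intro y hy
        rw [hslz y hy, List.count_cons]
        by_cases hx1 : x = 1 <;> simp [hx1, Int.add_comm]
      have htail : pairSum (x :: xs) (b + 1) (bs.map (· + 1)) = pairSum xs b bs :=
        pairSum_shift x xs bs b hb0 hmem' hdrop'
      by_cases hx2 : x = 2
      · -- x = 2: cut = 0 :: (b::bs).map (+1)
        subst hx2
        have hcut2 : posS (2 :: xs) 0 ++ [((2 :: xs : List Int).length : Int) - 1]
            = 0 :: (b :: bs).map (· + 1) := by
          rw [hcons, hlen2, if_pos rfl, List.cons_append, hmap]
        rw [hcut2]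
        simp only [pairSumSeg, List.map_cons, pairSum]
        have h1 : PySem.List.slice (2 :: xs : List Int) (some 0) (some ((0:Int) + 1)) = [2] := by
          rw [PySem.List.slice_toNat _ (by omega) (by omega)]
          simp
        have h2 := hcnt b hb
        rw [h1, htail, h2]
        have h4 : flushCost 0 ((if (2:Int) = 1 then 1 else 0) + ((PySem.List.slice xs (some 0) (some (b + 1))).count 1 : Int))
              + pairSum xs b bs = pairSumSeg 0 xs (b :: bs) := by
          simp [pairSumSeg]
        rw [h4, ← hct, ih 0]
        simp [G]
      · -- x ≠ 2: cut = (b::bs).map (+1)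
        have hcut1 : posS (x :: xs) 0 ++ [((x :: xs : List Int).length : Int) - 1]
            = (b :: bs).map (· + 1) := by
          rw [hcons, hlen2]
          simp only [if_neg hx2]
          exact hmap
        rw [hcut1]
        simp only [List.map_cons, pairSumSeg]
        rw [hcnt b hb, htail]
        have h4 : flushCost 0 (seg + ((if x = 1 then 1 else 0) + ((PySem.List.slice xs (some 0) (some (b + 1))).count 1 : Int)))
              + pairSum xs b bs = pairSumSeg (seg + (if x = 1 then 1 else 0)) xs (b :: bs) := by
          simp [pairSumSeg, add_assoc]
        rw [h4, ← hct, ih]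
        by_cases hx1 : x = 1 <;> simp [G, hx1, hx2]

theorem pyGetD_natCast_succ (xs : List Int) (k : Nat) (d : Int) :
    PySem.List.pyGetD xs ((k : Int) + 1) d = xs.getD (k + 1) d := by
  rw [show ((k : Int) + 1) = ((k + 1 : Nat) : Int) by push_cast; ring, PySem.List.pyGetD_natCast]

theorem TA_eq_TN (v cut : List Int) (k : Nat) : TA v cut (0 + (k : Int)) = TN v cut k := by
  simp [TA, TN, pyGetD_natCast_succ]

theorem foldl_flushCost {α : Type} (f : α → Int) :
    ∀ (l : List α) (acc : Int),
      l.foldl (fun cost i => flushCost cost (f i)) acc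
        = acc + (l.map (fun i => flushCost 0 (f i))).sum := by
  intro l
  induction l with
  | nil => intro acc; simp
  | cons x xs ih =>
      intro acc
      simp only [List.foldl_cons, List.map_cons, List.sum_cons]
      rw [ih, flushCost_eq]
      ring

theorem range_pairs (v : List Int) :
    ∀ (ct : List Int) (c0 : Int),
      ((List.range ct.length).map (fun k => flushCost 0 (TN v (c0 :: ct) k))).sum
        = pairSum v c0 ct := by
  intro ct
  induction ct with
  | nil => intro c0; simp [pairSum]
  | cons b bs ih =>
      intro c0
      rw [show (b :: bs : List Int).length = bs.length + 1 from rfl, List.range_succ_eq_map]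
      simp only [List.map_cons, List.map_map, List.sum_cons, Function.comp_def]
      have h0 : TN v (c0 :: b :: bs) 0
          = ((PySem.List.slice v (some c0) (some (b + 1))).count 1 : Int) := by
        simp [TN]
      have hs : ∀ k : Nat, TN v (c0 :: b :: bs) (k + 1) = TN v (b :: bs) k := by
        intro k; simp [TN]
      have hmapeq : (List.range bs.length).map (fun k => flushCost 0 (TN v (c0 :: b :: bs) (k + 1)))
          = (List.range bs.length).map (fun k => flushCost 0 (TN v (b :: bs) k)) :=
        List.map_congr_left (fun k _ => by rw [hs k])
      rw [h0, hmapeq, ih b]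
      rfl

theorem pairSum_zero (v : List Int) (ct : List Int) : pairSum v 0 ct = pairSumSeg 0 v ct := by
  cases ct <;> simp [pairSum, pairSumSeg]

theorem B_fold (v : List Int) :
    ∀ (cost seg : Int),
      flushCost (v.foldl (fun (st : Int × Int) x =>
          if x == 1 then (st.1, st.2 + 1)
          else if x == 2 then (flushCost st.1 st.2, 0)
          else st) (cost, seg)).1
        (v.foldl (fun (st : Int × Int) x =>
          if x == 1 then (st.1, st.2 + 1)
          else if x == 2 then (flushCost st.1 st.2, 0)
          else st) (cost, seg)).2
        = cost + G seg v := by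
  induction v with
  | nil =>
      intro cost seg
      simp only [List.foldl_nil, G]
      exact flushCost_eq cost seg
  | cons x xs ih =>
      intro cost seg
      simp only [List.foldl_cons]
      by_cases hx1 : x = 1
      · rw [if_pos (show (x == 1) = true by simp [hx1]), ih]
        simp only [G, if_pos hx1]
      · by_cases hx2 : x = 2
        · rw [if_neg (show ¬((x == 1) = true) by simp [hx1]),
              if_pos (show (x == 2) = true by simp [hx2]), ih]
          simp only [G, if_neg hx1, if_pos hx2]
          rw [flushCost_eq]
          ring
        · rw [if_neg (show ¬((x == 1) = true) by simp [hx1]),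
              if_neg (show ¬((x == 2) = true) by simp [hx2]), ih]
          simp only [G, if_neg hx1, if_neg hx2]

-- A's non-early branch equals G 0
theorem A_loop_eq (values : List Int) :
    (PySem.List.pyRange 0 (((((0 : Int) :: (posS values 0 ++ [((values.length : Int) - 1)])).length : Int) - 1)) 1).foldl
      (fun cost idx => flushCost cost (TA values ((0 : Int) :: (posS values 0 ++ [((values.length : Int) - 1)])) idx)) 0
      = G 0 values := by
  set ct := posS values 0 ++ [((values.length : Int) - 1)] with hct
  have hlen : ((((0 : Int) :: ct).length : Int) - 1) = (ct.length : Int) := by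
    simp
  rw [hlen, PySem.List.pyRange_one]
  have htonat : ((ct.length : Int) - 0).toNat = ct.length := by omega
  rw [htonat, List.foldl_map, foldl_flushCost]
  have hmapeq : (List.range ct.length).map (fun k : Nat => flushCost 0 (TA values ((0:Int) :: ct) (0 + (k : Int))))
      = (List.range ct.length).map (fun k : Nat => flushCost 0 (TN values ((0:Int) :: ct) k)) :=
    List.map_congr_left (fun k _ => by rw [TA_eq_TN])
  rw [hmapeq, range_pairs values ct 0, pairSum_zero, hct, main_pairSum]
  ring

-- ===== VERDICT (by name: the statement is the Claim_ definition above) =====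
theorem checkCostWithTrees_spec : Claim_equal_checkCostWithTrees := by
  unfold Claim_equal_checkCostWithTrees
  intro values count _ hpre
  unfold Spec_checkCostWithTrees checkCostWithTrees checkCostWithTrees_alt
  have hidx : ((PySem.List.enumerate values 0).filter (fun p => p.2 == 2)).map Prod.fst = posS values 0 := rfl
  simp only [hidx, posS_length values 0]
  have hc : ¬ count > (values.count 2 : Int) + 1 := by
    unfold Pre_checkCostWithTrees at hpre; omega
  · simp only [if_neg hc]
    calc (PySem.List.pyRange 0 (((((0 : Int) :: (posS values 0 ++ [((values.length : Int) - 1)])).length : Int) - 1)) 1).foldl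
          (fun cost idx => flushCost cost (TA values ((0 : Int) :: (posS values 0 ++ [((values.length : Int) - 1)])) idx)) 0
        = G 0 values := A_loop_eq values
      _ = 0 + G 0 values := by ring
      _ = _ := (B_fold values 0 0).symm
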